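-- pv_equiv track=rewrite | github.com/Choeseonjeong/Test | BaekJoon/0906/17.py | solution
-- ===== SOURCE A (Python) =====
-- def solution(answers):
--     a = [1, 2, 3, 4, 5]
--     b = [2, 1, 2, 3, 2, 4, 2, 5]
--     c = [3, 3, 1, 1, 2, 2, 4, 4, 5, 5]
--     aCount, bCount, cCount = 0, 0, 0
--
--     for i in range(len(answers)):
--         if a[i % len(a)] == answers[i]:
--             aCount += 1
--         if b[i % len(b)] == answers[i]:
--             bCount += 1
--         if c[i % len(c)] == answers[i]:
--             cCount += 1
--
--     k = max(aCount, bCount, cCount)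
--     result = []
--     if k == aCount:
--         result.append(1)
--     if k == bCount:
--         result.append(2)
--     if k == cCount:
--         result.append(3)
--
--     return result
-- ===== SOURCE B (Python) =====
-- def solution(answers):
--     # Histogram approach: one pass builds counts of (index mod 40, value) pairs
--     # (40 = lcm of the pattern lengths 5, 8, 10); each pattern's score is then
--     # 40 table lookups, no per-element comparisons against the patterns.
--     hist = {}
--     for i, x in enumerate(answers):
--         key = (i % 40, x)
--         hist[key] = hist.get(key, 0) + 1
--
--     def count(pat):
--         return sum(hist.get((r, pat[r % len(pat)]), 0) for r in range(40))
--
--     aCount = count([1, 2, 3, 4, 5])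
--     bCount = count([2, 1, 2, 3, 2, 4, 2, 5])
--     cCount = count([3, 3, 1, 1, 2, 2, 4, 4, 5, 5])
--     k = max(aCount, bCount, cCount)
--     return [n for n, cnt in ((1, aCount), (2, bCount), (3, cCount)) if cnt == k]
-- ===== Notes on version B (the rewrite author's own statement) =====
-- stated objective: alternative
-- what changed: Instead of comparing every answer against each of the three cyclic patterns, B builds in one pass a histogram of (index mod 40, value) pairs (40 = lcm of the pattern lengths 5, 8, 10) and obtains each pattern's score as 40 histogram lookups; the tie logic becomes a comprehension over (label, count) pairs.
import Mathlib
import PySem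

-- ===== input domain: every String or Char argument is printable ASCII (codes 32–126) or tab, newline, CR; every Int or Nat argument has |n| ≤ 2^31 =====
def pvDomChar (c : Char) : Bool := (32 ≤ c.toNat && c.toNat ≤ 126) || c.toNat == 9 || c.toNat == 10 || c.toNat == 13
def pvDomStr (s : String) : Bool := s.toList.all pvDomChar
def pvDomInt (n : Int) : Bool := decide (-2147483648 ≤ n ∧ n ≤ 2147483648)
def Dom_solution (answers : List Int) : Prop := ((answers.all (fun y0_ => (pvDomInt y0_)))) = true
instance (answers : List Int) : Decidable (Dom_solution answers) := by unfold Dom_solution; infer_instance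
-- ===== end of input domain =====

-- B replaces A's per-element pattern comparisons by a histogram of (index mod 40, value)
-- pairs (40 = lcm of the pattern lengths) built in one pass; each pattern's score is then
-- 40 table lookups. Objective: alternative (a different algorithm, same asymptotic cost).

-- ===== PORT A =====
def solution (answers : List Int) : List Int :=
  let a : List Int := [1, 2, 3, 4, 5]
  let b : List Int := [2, 1, 2, 3, 2, 4, 2, 5]
  let c : List Int := [3, 3, 1, 1, 2, 2, 4, 4, 5, 5]
  let s := (PySem.List.pyRange 0 (PySem.List.len answers) 1).foldl
    (fun (s : Int × Int × Int) i =>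
      let s1 := if PySem.List.pyGetD a (PySem.Int.mod i (PySem.List.len a)) 0 = PySem.List.pyGetD answers i 0 then s.1 + 1 else s.1
      let s2 := if PySem.List.pyGetD b (PySem.Int.mod i (PySem.List.len b)) 0 = PySem.List.pyGetD answers i 0 then s.2.1 + 1 else s.2.1
      let s3 := if PySem.List.pyGetD c (PySem.Int.mod i (PySem.List.len c)) 0 = PySem.List.pyGetD answers i 0 then s.2.2 + 1 else s.2.2
      (s1, s2, s3)) ((0 : Int), (0 : Int), (0 : Int))
  let k := max s.1 (max s.2.1 s.2.2)
  let r0 : List Int := []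
  let r1 := if k = s.1 then r0 ++ [1] else r0
  let r2 := if k = s.2.1 then r1 ++ [2] else r1
  if k = s.2.2 then r2 ++ [3] else r2

-- ===== PORT B =====
-- Source B's histogram loop: hist[(i % 40, x)] = hist.get((i % 40, x), 0) + 1
def altHist (answers : List Int) : PySem.Dict (Int × Int) Int :=
  (PySem.List.enumerate answers 0).foldl
    (fun d p =>
      d.insert (PySem.Int.mod p.1 40, p.2) (d.getD (PySem.Int.mod p.1 40, p.2) 0 + 1))
    PySem.Dict.empty

-- Source B's count helper: sum(hist.get((r, pat[r % len(pat)]), 0) for r in range(40))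
def altCount (hist : PySem.Dict (Int × Int) Int) (pat : List Int) : Int :=
  ((PySem.List.pyRange 0 40 1).map
    (fun r => hist.getD (r, PySem.List.pyGetD pat (PySem.Int.mod r (PySem.List.len pat)) 0) 0)).sum

def solution_alt (answers : List Int) : List Int :=
  let hist := altHist answers
  let aCount := altCount hist [1, 2, 3, 4, 5]
  let bCount := altCount hist [2, 1, 2, 3, 2, 4, 2, 5]
  let cCount := altCount hist [3, 3, 1, 1, 2, 2, 4, 4, 5, 5]
  let k := max aCount (max bCount cCount)
  (([((1 : Int), aCount), ((2 : Int), bCount), ((3 : Int), cCount)].filter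
      (fun p => p.2 == k)).map (fun p => p.1))

-- ===== PRECONDITION & SPEC =====
def Spec_solution (answers : List Int) (out : List Int) : Prop := out = solution_alt answers
instance (answers : List Int) (out : List Int) : Decidable (Spec_solution answers out) := by unfold Spec_solution; infer_instance

-- ===== CLAIM =====
def Claim_equal_solution : Prop := ∀ (answers : List Int), Dom_solution answers → Spec_solution answers (solution answers)

-- ===== LEMMAS AND PROOFS =====

-- the key list the histogram counts: (i mod 40, answers[i])
def klist (answers : List Int) : List (Int × Int) :=
  (PySem.List.enumerate answers 0).map (fun p => (PySem.Int.mod p.1 40, p.2))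

theorem hist_getD (answers : List Int) (v : Int × Int) :
    (altHist answers).getD v 0 = ((klist answers).count v : Int) := by
  unfold altHist klist
  rw [show (PySem.List.enumerate answers 0).foldl
        (fun (d : PySem.Dict (Int × Int) Int) p =>
          d.insert (PySem.Int.mod p.1 40, p.2) (d.getD (PySem.Int.mod p.1 40, p.2) 0 + 1))
        PySem.Dict.empty
      = ((PySem.List.enumerate answers 0).map (fun p => (PySem.Int.mod p.1 40, p.2))).foldl
        (fun (d : PySem.Dict (Int × Int) Int) x => d.insert x (d.getD x 0 + 1))
        PySem.Dict.empty from (List.foldl_map (f := fun p : Int × Int => (PySem.Int.mod p.1 40, p.2)) (g := fun (d : PySem.Dict (Int × Int) Int) x => d.insert x (d.getD x 0 + 1))).symm]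
  rw [PySem.Dict.getD_foldl_insert_add_one]
  simp [PySem.Dict.getD_empty]

theorem klist_bound (answers : List Int) : ∀ p ∈ klist answers, 0 ≤ p.1 ∧ p.1 < 40 := by
  intro p hp
  unfold klist at hp
  rcases List.mem_map.1 hp with ⟨q, _, rfl⟩
  rw [PySem.Int.mod_eq_emod_of_pos (by norm_num)]
  exact ⟨Int.emod_nonneg _ (by norm_num), Int.emod_lt_of_pos _ (by norm_num)⟩

-- summing the indicator of one key over range(40) hits exactly once
theorem sum_indicator (f : Int → Int) (q : Int × Int) (h0 : 0 ≤ q.1) (h1 : q.1 < 40) :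
    ((PySem.List.pyRange 0 40 1).map
        (fun r => if (q == (r, f r)) then (1 : Int) else 0)).sum
      = if f q.1 == q.2 then 1 else 0 := by
  rw [PySem.List.sum_map_ite_one_zero]
  by_cases hf : f q.1 = q.2
  · have hcong : ∀ r ∈ PySem.List.pyRange 0 40 1,
        ((q == (r, f r)) = true ↔ (r == q.1) = true) := by
      intro r _
      by_cases hr : r = q.1
      · subst hr
        simp [hf]
      · simp only [beq_iff_eq, Prod.ext_iff]
        exact ⟨fun h => absurd h.1.symm hr, fun h => absurd h hr⟩
    rw [List.countP_congr hcong]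
    have hmem : q.1 ∈ PySem.List.pyRange 0 40 1 := by
      rw [PySem.List.mem_pyRange_one]; exact ⟨h0, h1⟩
    have hone : (PySem.List.pyRange 0 40 1).count q.1 = 1 :=
      List.count_eq_one_of_mem (PySem.List.nodup_pyRange_one 0 40) hmem
    simp only [List.count] at hone
    simp [hone, hf]
  · have : (PySem.List.pyRange 0 40 1).countP (fun r => q == (r, f r)) = 0 := by
      rw [List.countP_eq_zero]
      intro r _
      simp only [beq_iff_eq, Prod.ext_iff]
      rintro ⟨rfl, h⟩
      exact hf h.symm
    simp [this, hf]

-- sum over range(40) of per-residue key counts = number of matching pairs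
theorem sum_count (f : Int → Int) :
    ∀ (kl : List (Int × Int)), (∀ p ∈ kl, 0 ≤ p.1 ∧ p.1 < 40) →
      ((PySem.List.pyRange 0 40 1).map (fun r => ((kl.count (r, f r)) : Int))).sum
        = ((kl.countP (fun p => f p.1 == p.2)) : Int) := by
  intro kl
  induction kl with
  | nil => intro _; simp
  | cons q t ih =>
    intro hb
    have hq := hb q (List.mem_cons_self)
    have ht := ih (fun p hp => hb p (List.mem_cons_of_mem _ hp))
    simp only [List.count_cons]
    push_cast
    rw [PySem.List.sum_map_add_int (f := fun r => ((t.count (r, f r) : Nat) : Int))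
          (g := fun r => if (q == (r, f r)) then (1 : Int) else 0),
        ht, sum_indicator f q hq.1 hq.2]
    rw [List.countP_cons]
    by_cases h : f q.1 = q.2 <;> push_cast <;> simp [h]

-- mod 40 then mod a divisor of 40 is mod that divisor
theorem mod_mod_40 (i L : Int) (hL : 0 < L) (hd : L ∣ 40) :
    PySem.Int.mod (PySem.Int.mod i 40) L = PySem.Int.mod i L := by
  rw [PySem.Int.mod_eq_emod_of_pos hL, PySem.Int.mod_eq_emod_of_pos hL,
      PySem.Int.mod_eq_emod_of_pos (a := i) (by norm_num)]
  exact Int.emod_emod_of_dvd i hd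

-- B's histogram count of a pattern = the straightforward match count over enumerate
theorem altCount_eq (answers pat : List Int) (hL : 0 < PySem.List.len pat)
    (hd : PySem.List.len pat ∣ 40) :
    altCount (altHist answers) pat
      = (((PySem.List.enumerate answers 0).countP
          (fun p => PySem.List.pyGetD pat (PySem.Int.mod p.1 (PySem.List.len pat)) 0 == p.2) : Nat) : Int) := by
  unfold altCount
  simp only [hist_getD]
  rw [sum_count (fun r => PySem.List.pyGetD pat (PySem.Int.mod r (PySem.List.len pat)) 0)
        (klist answers) (klist_bound answers)]
  unfold klist
  rw [List.countP_map]
  congr 1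
  apply List.countP_congr
  intro p _
  simp only [Function.comp_apply, mod_mod_40 p.1 _ hL hd]

-- A's per-pattern counting fold (over the index range) = the same enumerate count
theorem aCount_eq (answers pat : List Int) :
    (PySem.List.pyRange 0 (PySem.List.len answers) 1).foldl
        (fun (acc : Int) i =>
          if PySem.List.pyGetD pat (PySem.Int.mod i (PySem.List.len pat)) 0 = PySem.List.pyGetD answers i 0 then acc + 1 else acc) 0
      = (((PySem.List.enumerate answers 0).countP
          (fun p => PySem.List.pyGetD pat (PySem.Int.mod p.1 (PySem.List.len pat)) 0 == p.2) : Nat) : Int) := by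
  rw [PySem.List.foldl_ite_add_one]
  rw [PySem.List.enumerate_eq_map_pyRange (d := 0), List.countP_map]
  simp only [zero_add, Nat.cast_inj]
  apply List.countP_congr
  intro j _
  simp

-- a fold with three independent accumulators is three folds
theorem foldl_prod3 {α : Type} (l : List α) (f g h : Int → α → Int) (x y z : Int) :
    l.foldl (fun (s : Int × Int × Int) i => (f s.1 i, g s.2.1 i, h s.2.2 i)) (x, y, z)
      = (l.foldl f x, l.foldl g y, l.foldl h z) := by
  induction l generalizing x y z with
  | nil => rfl
  | cons a t ih => simpa using ih (f x a) (g y a) (h z a)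

-- the tie-breaking tail: A's append chain = B's comprehension over (label, count) pairs
theorem if_eq_comm {α : Type} (a b : Int) (x y : α) : (if a = b then x else y) = (if b = a then x else y) := by
  by_cases h : a = b
  · rw [if_pos h, if_pos h.symm]
  · rw [if_neg h, if_neg (fun hh => h hh.symm)]

theorem tie (aC bC cC k : Int) :
    (if k = cC then (if k = bC then (if k = aC then ([] : List Int) ++ [1] else []) ++ [2] else if k = aC then ([] : List Int) ++ [1] else []) ++ [3]
      else if k = bC then (if k = aC then ([] : List Int) ++ [1] else []) ++ [2] else if k = aC then ([] : List Int) ++ [1] else [])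
      = (([((1 : Int), aC), ((2 : Int), bC), ((3 : Int), cC)].filter (fun p => p.2 == k)).map (fun p => p.1)) := by
  rw [if_eq_comm k aC, if_eq_comm k bC, if_eq_comm k cC]
  simp only [List.filter_cons, List.filter_nil, beq_iff_eq]
  by_cases h1 : aC = k <;> by_cases h2 : bC = k <;> by_cases h3 : cC = k <;>
    simp [h1, h2, h3]

set_option maxHeartbeats 1000000 in
theorem solution_spec' (answers : List Int) : solution answers = solution_alt answers := by
  simp only [solution, solution_alt]
  rw [foldl_prod3
        (f := fun acc i => if PySem.List.pyGetD [1, 2, 3, 4, 5] (PySem.Int.mod i (PySem.List.len [1, 2, 3, 4, 5])) 0 = PySem.List.pyGetD answers i 0 then acc + 1 else acc)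
        (g := fun acc i => if PySem.List.pyGetD [2, 1, 2, 3, 2, 4, 2, 5] (PySem.Int.mod i (PySem.List.len [2, 1, 2, 3, 2, 4, 2, 5])) 0 = PySem.List.pyGetD answers i 0 then acc + 1 else acc)
        (h := fun acc i => if PySem.List.pyGetD [3, 3, 1, 1, 2, 2, 4, 4, 5, 5] (PySem.Int.mod i (PySem.List.len [3, 3, 1, 1, 2, 2, 4, 4, 5, 5])) 0 = PySem.List.pyGetD answers i 0 then acc + 1 else acc)]
  rw [aCount_eq answers [1, 2, 3, 4, 5],
      aCount_eq answers [2, 1, 2, 3, 2, 4, 2, 5],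
      aCount_eq answers [3, 3, 1, 1, 2, 2, 4, 4, 5, 5]]
  rw [← altCount_eq answers [1, 2, 3, 4, 5] (by decide) (by decide),
      ← altCount_eq answers [2, 1, 2, 3, 2, 4, 2, 5] (by decide) (by decide),
      ← altCount_eq answers [3, 3, 1, 1, 2, 2, 4, 4, 5, 5] (by decide) (by decide)]
  exact tie _ _ _ _

-- ===== VERDICT =====
theorem solution_spec : Claim_equal_solution := by
  intro answers _
  exact solution_spec' answers
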